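-- pv_equiv track=rewrite | github.com/ronzi-2002/Generating-Behavioral-Programs-Using-Large-Language-Models | src/UI_code_generation/exctracting_events.py | get_division_by_status
-- ===== SOURCE A (Python) =====
-- def get_division_by_status(events):
--     waitedEvents = []
--     requestedEvents = []
--     requestedAndWaitedEvents = []
--     for event in events:
--         if event['waitedFor'] and event['requested']:
--             requestedAndWaitedEvents.append(event)
--         elif event['waitedFor']:
--             waitedEvents.append(event)
--         elif event['requested']:
--             requestedEvents.append(event)
--     return waitedEvents, requestedEvents, requestedAndWaitedEvents
-- ===== SOURCE B (Python) =====
-- def get_division_by_status(events):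
--     # Stable sort-then-split: order events by a category rank (waited-only < requested-only
--     # < both < neither), then cut the sorted list into the three contiguous runs.
--     # Python's sort is stable, so each run keeps the original relative order.
--     rank = {(True, False): 0, (False, True): 1, (True, True): 2, (False, False): 3}
--     ks = [rank[(e['waitedFor'], e['requested'])] for e in events]
--     ordered = sorted(events, key=lambda e: rank[(e['waitedFor'], e['requested'])])
--     n0, n1, n2 = ks.count(0), ks.count(1), ks.count(2)
--     return ordered[:n0], ordered[n0:n0 + n1], ordered[n0 + n1:n0 + n1 + n2]
-- ===== Notes on version B (the rewrite author's own statement) =====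
-- stated objective: alternative
-- what changed: Replaces the single branching partition loop by a stable sort on a category rank followed by slicing the sorted list into its three contiguous runs (lengths obtained by counting ranks).
import Mathlib
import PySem

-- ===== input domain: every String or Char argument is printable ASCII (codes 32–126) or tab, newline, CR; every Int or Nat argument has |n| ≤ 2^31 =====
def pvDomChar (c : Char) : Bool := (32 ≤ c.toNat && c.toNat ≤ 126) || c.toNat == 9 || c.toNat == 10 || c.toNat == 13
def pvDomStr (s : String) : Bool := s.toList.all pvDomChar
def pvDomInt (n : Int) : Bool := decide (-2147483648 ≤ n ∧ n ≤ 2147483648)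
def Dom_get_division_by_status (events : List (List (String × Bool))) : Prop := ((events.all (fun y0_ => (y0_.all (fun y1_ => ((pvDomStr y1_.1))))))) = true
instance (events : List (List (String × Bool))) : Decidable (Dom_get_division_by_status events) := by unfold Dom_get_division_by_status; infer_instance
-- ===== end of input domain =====

-- B: stable sort by category rank, then slice the sorted list into its three contiguous runs (alternative algorithm; not faster).


-- ===== PORT A =====
-- event['k'] is a PySem.Dict lookup; Pre_ guarantees both keys are present, so .getD false never supplies its default inside Pre_.
def get_division_by_status (events : List (List (String × Bool))) : (List (List (String × Bool))) × (List (List (String × Bool))) × (List (List (String × Bool))) :=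
  let st := events.foldl
    (fun (st : List (List (String × Bool)) × List (List (String × Bool)) × List (List (String × Bool))) event =>
      let (waitedEvents, requestedEvents, requestedAndWaitedEvents) := st
      if ((PySem.Dict.mk event).get? "waitedFor").getD false && ((PySem.Dict.mk event).get? "requested").getD false then
        (waitedEvents, requestedEvents, requestedAndWaitedEvents ++ [event])
      else if ((PySem.Dict.mk event).get? "waitedFor").getD false then
        (waitedEvents ++ [event], requestedEvents, requestedAndWaitedEvents)
      else if ((PySem.Dict.mk event).get? "requested").getD false then
        (waitedEvents, requestedEvents ++ [event], requestedAndWaitedEvents)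
      else
        (waitedEvents, requestedEvents, requestedAndWaitedEvents))
    ([], [], [])
  (st.1, st.2.1, st.2.2)

-- ===== PORT B =====
-- the 4-entry 'rank' dict of Source B, keyed by the (waitedFor, requested) pair
def pvRankDict : PySem.Dict (Bool × Bool) Int :=
  PySem.Dict.mk [((true, false), 0), ((false, true), 1), ((true, true), 2), ((false, false), 3)]
-- rank[(e['waitedFor'], e['requested'])]; the dict is total on Bool×Bool, so .getD 0 never supplies its default
def pvKey (e : List (String × Bool)) : Int :=
  (pvRankDict.get? (((PySem.Dict.mk e).get? "waitedFor").getD false,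
                    ((PySem.Dict.mk e).get? "requested").getD false)).getD 0

def get_division_by_status_alt (events : List (List (String × Bool))) : (List (List (String × Bool))) × (List (List (String × Bool))) × (List (List (String × Bool))) :=
  let ks := events.map (fun e => pvKey e)
  let ordered := PySem.List.sorted events (fun e => pvKey e)
  let n0 : Int := (PySem.List.count ks 0 : Int)
  let n1 : Int := (PySem.List.count ks 1 : Int)
  let n2 : Int := (PySem.List.count ks 2 : Int)
  (PySem.List.slice ordered none (some n0),
   PySem.List.slice ordered (some n0) (some (n0 + n1)),
   PySem.List.slice ordered (some (n0 + n1)) (some (n0 + n1 + n2)))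

-- ===== PRECONDITION & SPEC =====
-- Pre_ excludes events missing the 'waitedFor' or 'requested' key, on which both Pythons raise KeyError.
def Pre_get_division_by_status (events : List (List (String × Bool))) : Prop :=
  ∀ e ∈ events, ((PySem.Dict.mk e).get? "waitedFor").isSome ∧ ((PySem.Dict.mk e).get? "requested").isSome
instance (events : List (List (String × Bool))) : Decidable (Pre_get_division_by_status events) := by unfold Pre_get_division_by_status; infer_instance
def pvWitness_get_division_by_status : (List (List (String × Bool))) :=
  [[("waitedFor", true), ("requested", false)], [("waitedFor", true), ("requested", true)], [("waitedFor", false), ("requested", false)]]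
def Spec_get_division_by_status (events : List (List (String × Bool))) (out : (List (List (String × Bool))) × (List (List (String × Bool))) × (List (List (String × Bool)))) : Prop := out = get_division_by_status_alt events
instance (events : List (List (String × Bool))) (out : (List (List (String × Bool))) × (List (List (String × Bool))) × (List (List (String × Bool)))) : Decidable (Spec_get_division_by_status events out) := by unfold Spec_get_division_by_status; infer_instance

-- ===== CLAIM (what is proved, stated in full; the proofs are below) =====
def Claim_equal_get_division_by_status : Prop := ∀ (events : List (List (String × Bool))), Dom_get_division_by_status events → Pre_get_division_by_status events → Spec_get_division_by_status events (get_division_by_status events)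

-- ===== LEMMAS AND PROOFS =====

-- abbreviations for the two key reads, used only by the proofs below
def pvW (e : List (String × Bool)) : Bool := ((PySem.Dict.mk e).get? "waitedFor").getD false
def pvR (e : List (String × Bool)) : Bool := ((PySem.Dict.mk e).get? "requested").getD false

theorem pvKey_eq (e : List (String × Bool)) :
    pvKey e = if pvW e && pvR e then 2 else if pvW e then 0 else if pvR e then 1 else 3 := by
  unfold pvKey pvW pvR
  cases ((PySem.Dict.mk e).get? "waitedFor").getD false <;>
    cases ((PySem.Dict.mk e).get? "requested").getD false <;> rfl

-- filter of one rank class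
def pvF (i : Int) (xs : List (List (String × Bool))) : List (List (String × Bool)) :=
  xs.filter (fun e => pvKey e == i)

theorem pvInsertBy_all_before {α : Type} (before : α → α → Bool) (x : α) (ys : List α)
    (h : ∀ y ∈ ys, before x y = true) :
    PySem.List.insertBy before x ys = x :: ys := by
  cases ys with
  | nil => rfl
  | cons y ys => simp [PySem.List.insertBy, h y (by simp)]

theorem pvInsertBy_append {α : Type} (before : α → α → Bool) (x : α) (ys zs : List α)
    (h : ∀ y ∈ ys, before x y = false) :
    PySem.List.insertBy before x (ys ++ zs) = ys ++ PySem.List.insertBy before x zs := by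
  induction ys with
  | nil => rfl
  | cons y ys ih =>
    have hy : before x y = false := h y (by simp)
    simp [PySem.List.insertBy, hy, ih (fun y hy => h y (by simp [hy]))]

-- A's loop, starting from arbitrary accumulators, extends them by the three rank filters.
theorem pvLoop_eq (events : List (List (String × Bool)))
    (w r b : List (List (String × Bool))) :
    events.foldl
      (fun (st : List (List (String × Bool)) × List (List (String × Bool)) × List (List (String × Bool))) event =>
        let (waitedEvents, requestedEvents, requestedAndWaitedEvents) := st
        if ((PySem.Dict.mk event).get? "waitedFor").getD false && ((PySem.Dict.mk event).get? "requested").getD false then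
          (waitedEvents, requestedEvents, requestedAndWaitedEvents ++ [event])
        else if ((PySem.Dict.mk event).get? "waitedFor").getD false then
          (waitedEvents ++ [event], requestedEvents, requestedAndWaitedEvents)
        else if ((PySem.Dict.mk event).get? "requested").getD false then
          (waitedEvents, requestedEvents ++ [event], requestedAndWaitedEvents)
        else
          (waitedEvents, requestedEvents, requestedAndWaitedEvents))
      (w, r, b)
    = (w ++ pvF 0 events, r ++ pvF 1 events, b ++ pvF 2 events) := by
  induction events generalizing w r b with
  | nil => simp [pvF]
  | cons e es ih =>
    rw [List.foldl_cons]
    have hk := pvKey_eq e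
    simp only [pvF, List.filter_cons]
    cases hw : pvW e <;> cases hr : pvR e <;>
      simp only [hw, hr, Bool.and_true, Bool.and_false, if_true] at hk <;>
      simp only [pvW, pvR] at hw hr <;>
      simp only [hw, hr, hk, Bool.true_and, Bool.false_and, if_true, if_false,
        Bool.false_eq_true] <;>
      rw [ih] <;> simp [pvF, List.append_assoc]

-- the stable insertion sort by rank groups the list into the four rank classes, in order
theorem pvSortedGroups_aux (xs : List (List (String × Bool)))
    (g0 g1 g2 g3 : List (List (String × Bool)))
    (h0 : ∀ e ∈ g0, pvKey e = 0) (h1 : ∀ e ∈ g1, pvKey e = 1)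
    (h2 : ∀ e ∈ g2, pvKey e = 2) (h3 : ∀ e ∈ g3, pvKey e = 3) :
    xs.foldl (fun acc x => PySem.List.insertBy (fun a b => decide (pvKey a < pvKey b)) x acc)
        (g0 ++ (g1 ++ (g2 ++ g3)))
    = (g0 ++ pvF 0 xs) ++ ((g1 ++ pvF 1 xs) ++ ((g2 ++ pvF 2 xs) ++ (g3 ++ pvF 3 xs))) := by
  induction xs generalizing g0 g1 g2 g3 with
  | nil => simp [pvF]
  | cons e es ih =>
    rw [List.foldl_cons]
    have hk := pvKey_eq e
    have hcase : pvKey e = 0 ∨ pvKey e = 1 ∨ pvKey e = 2 ∨ pvKey e = 3 := by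
      rw [hk]; cases pvW e <;> cases pvR e <;> simp
    rcases hcase with hke | hke | hke | hke
    · -- rank 0: goes to the end of g0, before g1/g2/g3
      rw [pvInsertBy_append _ _ g0 _ (fun y hy => by simp [h0 y hy, hke]),
          pvInsertBy_all_before _ _ _ (fun y hy => by
            rcases List.mem_append.1 hy with hy | hy
            · simp [h1 y hy, hke]
            · rcases List.mem_append.1 hy with hy | hy
              · simp [h2 y hy, hke]
              · simp [h3 y hy, hke]),
          show g0 ++ e :: (g1 ++ (g2 ++ g3)) = (g0 ++ [e]) ++ (g1 ++ (g2 ++ g3)) from by simp,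
          ih (g0 ++ [e]) g1 g2 g3
            (fun y hy => by rcases List.mem_append.1 hy with hy | hy
                            · exact h0 y hy
                            · simp at hy; subst hy; exact hke) h1 h2 h3]
      simp [pvF, hke, List.append_assoc]
    · -- rank 1
      rw [pvInsertBy_append _ _ g0 _ (fun y hy => by simp [h0 y hy, hke]),
          pvInsertBy_append _ _ g1 _ (fun y hy => by simp [h1 y hy, hke]),
          pvInsertBy_all_before _ _ _ (fun y hy => by
            rcases List.mem_append.1 hy with hy | hy
            · simp [h2 y hy, hke]
            · simp [h3 y hy, hke]),
          show g1 ++ e :: (g2 ++ g3) = (g1 ++ [e]) ++ (g2 ++ g3) from by simp,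
          ih g0 (g1 ++ [e]) g2 g3 h0
            (fun y hy => by rcases List.mem_append.1 hy with hy | hy
                            · exact h1 y hy
                            · simp at hy; subst hy; exact hke) h2 h3]
      simp [pvF, hke, List.append_assoc]
    · -- rank 2
      rw [pvInsertBy_append _ _ g0 _ (fun y hy => by simp [h0 y hy, hke]),
          pvInsertBy_append _ _ g1 _ (fun y hy => by simp [h1 y hy, hke]),
          pvInsertBy_append _ _ g2 _ (fun y hy => by simp [h2 y hy, hke]),
          pvInsertBy_all_before _ _ _ (fun y hy => by simp [h3 y hy, hke]),
          show g2 ++ e :: g3 = (g2 ++ [e]) ++ g3 from by simp,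
          ih g0 g1 (g2 ++ [e]) g3 h0 h1
            (fun y hy => by rcases List.mem_append.1 hy with hy | hy
                            · exact h2 y hy
                            · simp at hy; subst hy; exact hke) h3]
      simp [pvF, hke, List.append_assoc]
    · -- rank 3: appended at the very end
      rw [pvInsertBy_append _ _ g0 _ (fun y hy => by simp [h0 y hy, hke]),
          pvInsertBy_append _ _ g1 _ (fun y hy => by simp [h1 y hy, hke]),
          pvInsertBy_append _ _ g2 _ (fun y hy => by simp [h2 y hy, hke]),
          PySem.List.insertBy_of_forall_not_before _ _ _ (fun y hy => by simp [h3 y hy, hke]),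
          ih g0 g1 g2 (g3 ++ [e]) h0 h1 h2
            (fun y hy => by rcases List.mem_append.1 hy with hy | hy
                            · exact h3 y hy
                            · simp at hy; subst hy; exact hke)]
      simp [pvF, hke, List.append_assoc]

theorem pvSortedGroups (xs : List (List (String × Bool))) :
    PySem.List.sorted xs (fun e => pvKey e)
    = pvF 0 xs ++ (pvF 1 xs ++ (pvF 2 xs ++ pvF 3 xs)) := by
  rw [PySem.List.sorted_eq_foldl_insertBy]
  have := pvSortedGroups_aux xs [] [] [] [] (by simp) (by simp) (by simp) (by simp)
  simpa using this

theorem pvCount_eq (xs : List (List (String × Bool))) (i : Int) :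
    PySem.List.count (xs.map (fun e => pvKey e)) i = (pvF i xs).length := by
  rw [PySem.List.count_eq, pvF, List.count_eq_countP, List.countP_map,
      List.countP_eq_length_filter]
  congr 1

-- ===== VERDICT (by name: the statement is the Claim_ definition above) =====
theorem get_division_by_status_spec : Claim_equal_get_division_by_status := by
  intro events _ _
  show _ = _
  unfold get_division_by_status get_division_by_status_alt
  rw [pvLoop_eq]
  simp only [pvCount_eq, pvSortedGroups]
  have hsl0 : PySem.List.slice (pvF 0 events ++ (pvF 1 events ++ (pvF 2 events ++ pvF 3 events)))
      none (some ((pvF 0 events).length : Int)) = pvF 0 events := by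
    rw [PySem.List.slice_to_natCast]
    exact List.take_left
  have hsl1 : PySem.List.slice (pvF 0 events ++ (pvF 1 events ++ (pvF 2 events ++ pvF 3 events)))
      (some ((pvF 0 events).length : Int))
      (some (((pvF 0 events).length : Int) + ((pvF 1 events).length : Int))) = pvF 1 events := by
    rw [PySem.List.slice_natCast_add, List.drop_left, List.take_left]
  have hsl2 : PySem.List.slice (pvF 0 events ++ (pvF 1 events ++ (pvF 2 events ++ pvF 3 events)))
      (some (((pvF 0 events).length : Int) + ((pvF 1 events).length : Int)))
      (some ((((pvF 0 events).length : Int) + ((pvF 1 events).length : Int)) + ((pvF 2 events).length : Int)))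
      = pvF 2 events := by
    have h1 : (((pvF 0 events).length : Int) + ((pvF 1 events).length : Int))
        = (((pvF 0 events).length + (pvF 1 events).length : Nat) : Int) := by push_cast; ring
    have h2 : ((((pvF 0 events).length : Int) + ((pvF 1 events).length : Int)) + ((pvF 2 events).length : Int))
        = ((((pvF 0 events).length + (pvF 1 events).length : Nat) : Int) + ((pvF 2 events).length : Int)) := by
      push_cast; ring
    rw [h2, h1, PySem.List.slice_natCast_add]
    rw [show pvF 0 events ++ (pvF 1 events ++ (pvF 2 events ++ pvF 3 events))
        = (pvF 0 events ++ pvF 1 events) ++ (pvF 2 events ++ pvF 3 events) from by simp]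
    rw [show (pvF 0 events).length + (pvF 1 events).length
        = (pvF 0 events ++ pvF 1 events).length from by simp]
    rw [List.drop_left, List.take_left]
  simp only [hsl0, hsl1, hsl2]
  simp
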